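-- pv_equiv track=rewrite | github.com/Abdulaziz9907/Project-AI-model | ai_features.py | primary_cause
-- ===== SOURCE A (Python) =====
-- def primary_cause(cause_str: str) -> str:
--     if not isinstance(cause_str, str) or not cause_str.strip():
--         return "NORMAL"
--     parts = [p.strip().upper() for p in cause_str.split(";") if p.strip()]
--     if not parts:
--         return "NORMAL"
--
--     priority = [
--         "WLC_DOWN",
--         "WIFI_DOWN",
--         "UPLINK_CONGEST",
--         "DNS_OUTAGE",
--         "DHCP_ISSUE",
--         "LMS_OUTAGE",
--         "HTTP_OUTAGE",
--         "HTTPS_OUTAGE",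
--         "LMS_SLOW",
--         "HTTP_SLOW",
--         "HTTPS_SLOW",
--     ]
--     for p in priority:
--         if p in parts:
--             return p
--     return parts[0]
-- ===== SOURCE B (Python) =====
-- def primary_cause(cause_str: str) -> str:
--     if not cause_str.strip():
--         return "NORMAL"
--     parts = [q.upper() for q in (p.strip() for p in cause_str.split(";")) if q]
--     if not parts:
--         return "NORMAL"
--
--     order = ["WLC_DOWN", "WIFI_DOWN", "UPLINK_CONGEST", "DNS_OUTAGE", "DHCP_ISSUE", "LMS_OUTAGE",
--              "HTTP_OUTAGE", "HTTPS_OUTAGE", "LMS_SLOW", "HTTP_SLOW", "HTTPS_SLOW"]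
--     rank = {tok: i for i, tok in enumerate(order)}
--     best = None
--     best_rank = len(order)
--     for q in parts:
--         r = rank.get(q)
--         if r is not None and r < best_rank:
--             best, best_rank = q, r
--     return best if best is not None else parts[0]
-- ===== Notes on version B (the rewrite author's own statement) =====
-- stated objective: alternative
-- what changed: Replaces A's scan over the priority list with repeated membership tests in parts by a rank dictionary built once and a single min-rank-tracking pass over parts.
import Mathlib
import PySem

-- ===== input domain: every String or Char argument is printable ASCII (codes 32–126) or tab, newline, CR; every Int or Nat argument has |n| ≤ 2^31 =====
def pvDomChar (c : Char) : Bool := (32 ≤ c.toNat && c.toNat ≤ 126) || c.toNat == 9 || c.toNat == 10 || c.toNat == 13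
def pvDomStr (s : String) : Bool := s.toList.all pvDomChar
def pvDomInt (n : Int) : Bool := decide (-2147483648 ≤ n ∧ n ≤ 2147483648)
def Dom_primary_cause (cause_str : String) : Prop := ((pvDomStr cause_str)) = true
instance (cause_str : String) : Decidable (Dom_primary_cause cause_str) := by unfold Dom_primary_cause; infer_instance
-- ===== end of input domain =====

-- B replaces A's scan over the priority list (membership test in parts per token)
-- by a rank dictionary built once and a single min-rank-tracking pass over parts
-- (objective: alternative decomposition).

-- ===== PORT A =====
-- the priority list (identical literal in both Python sources)
def pcPriority : List String :=
  ["WLC_DOWN", "WIFI_DOWN", "UPLINK_CONGEST", "DNS_OUTAGE", "DHCP_ISSUE",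
   "LMS_OUTAGE", "HTTP_OUTAGE", "HTTPS_OUTAGE", "LMS_SLOW", "HTTP_SLOW", "HTTPS_SLOW"]

-- parts = [p.strip().upper() for p in cause_str.split(";") if p.strip()]
def pcParts (cause_str : String) : List String :=
  (((PySem.Str.split? cause_str ";").getD []).filter
      (fun p => PySem.Str.strip p != "")).map
    (fun p => PySem.Str.upper (PySem.Str.strip p))

-- A's `for p in priority: if p in parts: return p`
def pcLoop : List String → List String → Option String
  | [], _ => none
  | p :: rest, parts => if parts.contains p then some p else pcLoop rest parts

def primary_cause (cause_str : String) : String :=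
  if PySem.Str.strip cause_str == "" then "NORMAL"
  else
    match pcParts cause_str with
    | [] => "NORMAL"
    | p0 :: rest =>
      match pcLoop pcPriority (p0 :: rest) with
      | some p => p
      | none => p0

-- ===== PORT B =====
-- B's order table (one-line literal in Source B)
def pcOrder : List String :=
  ["WLC_DOWN", "WIFI_DOWN", "UPLINK_CONGEST", "DNS_OUTAGE", "DHCP_ISSUE", "LMS_OUTAGE",
   "HTTP_OUTAGE", "HTTPS_OUTAGE", "LMS_SLOW", "HTTP_SLOW", "HTTPS_SLOW"]

-- B's parts pipeline: strip every piece, keep the truthy ones, uppercase them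
def pcPartsB (cause_str : String) : List String :=
  ((((PySem.Str.split? cause_str ";").getD []).map (fun p => PySem.Str.strip p)).filter
      (fun q => q != "")).map (fun q => PySem.Str.upper q)

-- rank = {tok: i for i, tok in enumerate(order)}
def pcRank : PySem.Dict String Int :=
  (PySem.List.enumerate pcOrder 0).foldl
    (fun d it => d.insert it.2 it.1) PySem.Dict.empty

-- the loop body: state (best, best_rank)
def pcStep (st : Option String × Int) (p : String) : Option String × Int :=
  match PySem.Dict.get? pcRank p with
  | some r => if r < st.2 then (some p, r) else st
  | none => st

-- the min-tracking pass, started at (None, len(priority))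
def pcBestFold (parts : List String) : Option String × Int :=
  parts.foldl pcStep (none, (11 : Int))

def primary_cause_alt (cause_str : String) : String :=
  if PySem.Str.strip cause_str == "" then "NORMAL"
  else
    match pcPartsB cause_str with
    | [] => "NORMAL"
    | q0 :: qrest =>
      match (pcBestFold (q0 :: qrest)).1 with
      | some b => b
      | none => q0

-- ===== PRECONDITION & SPEC =====
def Spec_primary_cause (cause_str : String) (out : String) : Prop := out = primary_cause_alt cause_str
instance (cause_str : String) (out : String) : Decidable (Spec_primary_cause cause_str out) := by unfold Spec_primary_cause; infer_instance

-- ===== CLAIM (what is proved, stated in full; the proofs are below) =====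
def Claim_equal_primary_cause : Prop := ∀ (cause_str : String), Dom_primary_cause cause_str → Spec_primary_cause cause_str (primary_cause cause_str)

-- ===== LEMMAS AND PROOFS =====

-- proof-side rank function: rk pr p = position of p in pr (first match)
def rk : List String → String → Option Nat
  | [], _ => none
  | t :: pr, p => if t = p then some 0 else (rk pr p).map (· + 1)

-- generic Nat-rank min-tracking fold
def gstep (R : String → Option Nat) (st : Option String × Nat) (p : String) : Option String × Nat :=
  match R p with
  | some r => if r < st.2 then (some p, r) else st
  | none => st

def gfold (R : String → Option Nat) (parts : List String) (st : Option String × Nat) :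
    Option String × Nat :=
  parts.foldl (gstep R) st

lemma gfold_cons (R : String → Option Nat) (p : String) (rest : List String)
    (st : Option String × Nat) : gfold R (p :: rest) st = gfold R rest (gstep R st p) := rfl

lemma gfold_congr (R R' : String → Option Nat) (parts : List String)
    (h : ∀ p ∈ parts, R p = R' p) (st : Option String × Nat) :
    gfold R parts st = gfold R' parts st := by
  induction parts generalizing st with
  | nil => rfl
  | cons p rest ih =>
    rw [gfold_cons, gfold_cons]
    have hp : R p = R' p := h p (List.mem_cons_self ..)
    rw [show gstep R st p = gstep R' st p by simp [gstep, hp]]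
    exact ih (fun q hq => h q (List.mem_cons_of_mem _ hq)) _

lemma gfold_none (R : String → Option Nat) (parts : List String) (st : Option String × Nat)
    (h : ∀ p ∈ parts, R p = none) : gfold R parts st = st := by
  induction parts generalizing st with
  | nil => rfl
  | cons p rest ih =>
    rw [gfold_cons, show gstep R st p = st by simp [gstep, h p (List.mem_cons_self ..)]]
    exact ih _ (fun q hq => h q (List.mem_cons_of_mem _ hq))

lemma gfold_stay0 (R : String → Option Nat) (parts : List String) (st : Option String × Nat)
    (h : st.2 = 0) : gfold R parts st = st := by
  induction parts generalizing st with
  | nil => rfl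
  | cons p rest ih =>
    rw [gfold_cons, show gstep R st p = st by cases hR : R p <;> simp [gstep, hR, h]]
    exact ih _ h

-- if t occurs in parts, the fold over rk (t :: pr) ends with best = t
lemma gfold_zero_wins (pr : List String) (t : String) (parts : List String) :
    ∀ st : Option String × Nat, (st.2 = 0 → st.1 = some t) →
      t ∈ parts → (gfold (rk (t :: pr)) parts st).1 = some t := by
  induction parts with
  | nil => intro st _ hc; simp at hc
  | cons p rest ih =>
    intro st hst hc
    rw [gfold_cons]
    by_cases hp : t = p
    · subst hp
      by_cases h0 : 0 < st.2
      · rw [show gstep (rk (t :: pr)) st t = (some t, 0) by simp [gstep, rk, h0]]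
        rw [gfold_stay0 _ _ _ rfl]
      · have h2 : st.2 = 0 := by omega
        rw [show gstep (rk (t :: pr)) st t = st by simp [gstep, rk, h2]]
        rw [gfold_stay0 _ _ _ h2]
        exact hst h2
    · have hc' : t ∈ rest := by
        rcases List.mem_cons.mp hc with h | h
        · exact absurd h hp
        · exact h
      apply ih _ _ hc'
      intro h2
      by_cases hq : gstep (rk (t :: pr)) st p = st
      · rw [hq] at h2 ⊢; exact hst h2
      · exfalso
        simp only [gstep, rk, if_neg hp] at hq h2
        cases hr : rk pr p with
        | none => simp [hr] at hq
        | some r =>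
          simp only [hr, Option.map_some] at hq h2
          by_cases hlt : r + 1 < st.2
          · rw [if_pos hlt] at h2; simp at h2
          · rw [if_neg hlt] at hq; exact hq rfl

-- shifting all ranks (and the threshold) by one does not change anything
lemma gfold_shift (R : String → Option Nat) (parts : List String) :
    ∀ st : Option String × Nat,
      gfold (fun p => (R p).map (· + 1)) parts (st.1, st.2 + 1) =
        ((gfold R parts st).1, (gfold R parts st).2 + 1) := by
  induction parts with
  | nil => intro st; rfl
  | cons p rest ih =>
    intro st
    rw [gfold_cons, gfold_cons]
    cases hr : R p with
    | none => rw [show gstep (fun p => (R p).map (· + 1)) (st.1, st.2 + 1) p = (st.1, st.2 + 1) by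
        simp [gstep, hr], show gstep R st p = st by simp [gstep, hr]]; exact ih st
    | some r =>
      by_cases hlt : r < st.2
      · rw [show gstep (fun p => (R p).map (· + 1)) (st.1, st.2 + 1) p = (some p, r + 1) by
          simp [gstep, hr]; omega,
          show gstep R st p = (some p, r) by simp [gstep, hr, hlt]]
        exact ih (some p, r)
      · rw [show gstep (fun p => (R p).map (· + 1)) (st.1, st.2 + 1) p = (st.1, st.2 + 1) by
          simp [gstep, hr]; omega,
          show gstep R st p = st by simp [gstep, hr, hlt]]
        exact ih st

-- A's priority loop computes the min-rank fold
lemma pcLoop_eq_gfold (pr : List String) (parts : List String) :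
    pcLoop pr parts = (gfold (rk pr) parts (none, pr.length)).1 := by
  induction pr with
  | nil =>
    rw [gfold_none]
    · rfl
    · intro p _; rfl
  | cons t pr ih =>
    by_cases hc : parts.contains t = true
    · have hm : t ∈ parts := by simpa using hc
      rw [show pcLoop (t :: pr) parts = some t by simp [pcLoop, hm]]
      exact (gfold_zero_wins pr t parts _ (by intro h; simp at h) hm).symm
    · have ht : t ∉ parts := by
        intro hm; exact hc (by simpa using hm)
      rw [show pcLoop (t :: pr) parts = pcLoop pr parts by simp [pcLoop, ht]]
      rw [ih]
      have hcg : gfold (rk (t :: pr)) parts (none, (t :: pr).length) =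
          gfold (fun p => (rk pr p).map (· + 1)) parts (none, pr.length + 1) := by
        apply gfold_congr
        intro p hp
        have : t ≠ p := fun h => ht (h ▸ hp)
        simp [rk, this]
      rw [hcg, gfold_shift (rk pr) parts (none, pr.length)]

-- bridge: the rank dictionary of B agrees with rk pcPriority (as Int via ofNat)
lemma pcRank_get?_eq (p : String) :
    PySem.Dict.get? pcRank p = (rk pcPriority p).map (fun n => (n : Int)) := by
  by_cases h0 : "WLC_DOWN" = p
  · subst h0; decide
  by_cases h1 : "WIFI_DOWN" = p
  · subst h1; decide
  by_cases h2 : "UPLINK_CONGEST" = p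
  · subst h2; decide
  by_cases h3 : "DNS_OUTAGE" = p
  · subst h3; decide
  by_cases h4 : "DHCP_ISSUE" = p
  · subst h4; decide
  by_cases h5 : "LMS_OUTAGE" = p
  · subst h5; decide
  by_cases h6 : "HTTP_OUTAGE" = p
  · subst h6; decide
  by_cases h7 : "HTTPS_OUTAGE" = p
  · subst h7; decide
  by_cases h8 : "LMS_SLOW" = p
  · subst h8; decide
  by_cases h9 : "HTTP_SLOW" = p
  · subst h9; decide
  by_cases h10 : "HTTPS_SLOW" = p
  · subst h10; decide
  have hd : pcRank = PySem.Dict.mk [("WLC_DOWN", 0), ("WIFI_DOWN", 1), ("UPLINK_CONGEST", 2),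
      ("DNS_OUTAGE", 3), ("DHCP_ISSUE", 4), ("LMS_OUTAGE", 5), ("HTTP_OUTAGE", 6),
      ("HTTPS_OUTAGE", 7), ("LMS_SLOW", 8), ("HTTP_SLOW", 9), ("HTTPS_SLOW", 10)] := by decide
  rw [hd]
  simp [PySem.Dict.get?_mk_cons, rk, pcPriority, h0, h1, h2, h3, h4, h5, h6, h7, h8, h9, h10]
  rfl

-- bridge: B's Int fold is the Nat fold
lemma pcBestFold_eq_gfold (parts : List String) :
    ∀ st : Option String × Nat,
      parts.foldl pcStep (st.1, (st.2 : Int)) =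
        ((gfold (rk pcPriority) parts st).1, ((gfold (rk pcPriority) parts st).2 : Int)) := by
  induction parts with
  | nil => intro st; rfl
  | cons p rest ih =>
    intro st
    rw [List.foldl_cons, gfold_cons]
    cases hr : rk pcPriority p with
    | none =>
      rw [show pcStep (st.1, (st.2 : Int)) p = (st.1, (st.2 : Int)) by
        simp [pcStep, pcRank_get?_eq, hr], show gstep (rk pcPriority) st p = st by
        simp [gstep, hr]]
      exact ih st
    | some r =>
      by_cases hlt : r < st.2
      · rw [show pcStep (st.1, (st.2 : Int)) p = (some p, (r : Int)) by
          simp [pcStep, pcRank_get?_eq, hr]; omega,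
          show gstep (rk pcPriority) st p = (some p, r) by simp [gstep, hr, hlt]]
        exact ih (some p, r)
      · rw [show pcStep (st.1, (st.2 : Int)) p = (st.1, (st.2 : Int)) by
          simp [pcStep, pcRank_get?_eq, hr]; omega,
          show gstep (rk pcPriority) st p = st by simp [gstep, hr, hlt]]
        exact ih st

-- B's parts pipeline equals A's comprehension
lemma pcPartsB_eq (cause_str : String) : pcPartsB cause_str = pcParts cause_str := by
  simp [pcPartsB, pcParts, List.filter_map, List.map_map]
  rfl

-- the key equation: B's pass selects exactly A's first priority hit
lemma pcBest_eq_pcLoop (parts : List String) :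
    (pcBestFold parts).1 = pcLoop pcPriority parts := by
  have h := pcBestFold_eq_gfold parts (none, 11)
  simp only [pcBestFold]
  rw [show ((none, (11 : Int)) : Option String × Int) = ((none : Option String), ((11 : Nat) : Int)) by rfl]
  rw [h, pcLoop_eq_gfold]
  rfl

-- ===== VERDICT (by name: the statement is the Claim_ definition above) =====
theorem primary_cause_spec : Claim_equal_primary_cause := by
  intro cause_str _
  unfold Spec_primary_cause primary_cause primary_cause_alt
  simp only [pcPartsB_eq, pcBest_eq_pcLoop]
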